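-- pv_equiv track=rewrite | github.com/poszy/UdacityDA | Project 1/Task3.py | filterMobileNumbers
-- ===== SOURCE A (Python) =====
-- def filterMobileNumbers(callList):
--
--     # Get mobile numbers that start with 7,8,9
--     list7 = [i for i in callList if i.startswith('7')]
--     list8 = [j for j in callList if j.startswith('8')]
--     list9 = [x for x in callList if x.startswith('9')]
--
--     # Combine all List
--     combinedList = list7 + list8 + list9
--
--     finalMobileAreaCodes = []
--     mobileAreaCodes = []
--
--     # I need to iterator over combined list index
--     j = 0
--     for i in range(len(combinedList)):
--         mobileAreaCodes.append( combinedList[j][:4] )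
--         j = j + 1
--
--     # only add unique area codes to final list
--     finalMobileAreaCodes = []
--     for e in mobileAreaCodes:
--         if e not in finalMobileAreaCodes:
--             finalMobileAreaCodes.append(e)
--     return finalMobileAreaCodes
-- ===== SOURCE B (Python) =====
-- def filterMobileNumbers(callList):
--     # One pass: bucket each number's 4-char code by its leading digit, deduping on insert.
--     l7, l8, l9 = [], [], []
--     for number in callList:
--         first = number[:1]
--         if first == '7':
--             bucket = l7
--         elif first == '8':
--             bucket = l8
--         elif first == '9':
--             bucket = l9
--         else:
--             continue
--         code = number[:4]
--         if code not in bucket: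
--             bucket.append(code)
--     return l7 + l8 + l9
-- ===== Notes on version B (the rewrite author's own statement) =====
-- stated objective: simpler
-- what changed: Replaces A's three filter passes + concatenation + index loop + global dedup pass with a single pass that buckets each number's 4-char prefix by its leading digit (7/8/9), deduping per bucket on insert, then concatenates the buckets; one traversal and smaller per-bucket membership scans give a constant-factor speedup.
import Mathlib
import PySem

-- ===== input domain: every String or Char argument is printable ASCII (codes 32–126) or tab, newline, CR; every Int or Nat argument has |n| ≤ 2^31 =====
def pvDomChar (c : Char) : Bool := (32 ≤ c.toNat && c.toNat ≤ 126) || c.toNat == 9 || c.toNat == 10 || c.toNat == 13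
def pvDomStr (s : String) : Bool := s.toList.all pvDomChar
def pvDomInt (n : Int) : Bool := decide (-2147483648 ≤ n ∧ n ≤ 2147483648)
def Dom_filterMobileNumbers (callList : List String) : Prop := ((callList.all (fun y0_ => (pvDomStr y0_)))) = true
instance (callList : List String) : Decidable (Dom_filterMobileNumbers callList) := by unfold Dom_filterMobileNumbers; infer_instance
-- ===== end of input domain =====

-- B replaces A's three filter passes + concatenation + index loop + global dedup
-- with a single bucketing pass (dedup per bucket on insert); objective: simpler.

-- ===== PORT A =====
def filterMobileNumbers (callList : List String) : List String :=
  let list7 := callList.filter (fun i => PySem.Str.startswith i "7")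
  let list8 := callList.filter (fun j => PySem.Str.startswith j "8")
  let list9 := callList.filter (fun x => PySem.Str.startswith x "9")
  let combinedList := list7 ++ list8 ++ list9
  -- for i in range(len(combinedList)): mobileAreaCodes.append(combinedList[j][:4]); j += 1
  let st := (PySem.List.pyRange 0 combinedList.length 1).foldl
    (fun (st : List String × Int) _ =>
      (st.1 ++ [PySem.Str.slice (PySem.List.pyGetD combinedList st.2 "") none (some 4)], st.2 + 1))
    ([], 0)
  let mobileAreaCodes := st.1
  mobileAreaCodes.foldl (fun acc e => if e ∈ acc then acc else acc ++ [e]) []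

-- ===== PORT B =====
def fmnAltStep (st : List String × List String × List String) (number : String) :
    List String × List String × List String :=
  let first := PySem.Str.slice number none (some 1)
  let code := PySem.Str.slice number none (some 4)
  if first = "7" then
    (if code ∈ st.1 then st else (st.1 ++ [code], st.2.1, st.2.2))
  else if first = "8" then
    (if code ∈ st.2.1 then st else (st.1, st.2.1 ++ [code], st.2.2))
  else if first = "9" then
    (if code ∈ st.2.2 then st else (st.1, st.2.1, st.2.2 ++ [code]))
  else st

def filterMobileNumbers_alt (callList : List String) : List String :=
  let st := callList.foldl fmnAltStep ([], [], [])
  st.1 ++ st.2.1 ++ st.2.2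

-- ===== PRECONDITION & SPEC =====
def Spec_filterMobileNumbers (callList : List String) (out : List String) : Prop := out = filterMobileNumbers_alt callList
instance (callList : List String) (out : List String) : Decidable (Spec_filterMobileNumbers callList out) := by unfold Spec_filterMobileNumbers; infer_instance

-- ===== CLAIM (what is proved, stated in full; the proofs are below) =====
def Claim_equal_filterMobileNumbers : Prop := ∀ (callList : List String), Dom_filterMobileNumbers callList → Spec_filterMobileNumbers callList (filterMobileNumbers callList)

-- ===== LEMMAS AND PROOFS =====

-- dedup-with-accumulator: the final loop of A and the per-bucket insert of B
def fmnDD (acc : List String) (xs : List String) : List String :=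
  xs.foldl (fun acc e => if e ∈ acc then acc else acc ++ [e]) acc

theorem mem_fmnDD (acc xs : List String) (e : String) :
    e ∈ fmnDD acc xs → e ∈ acc ∨ e ∈ xs := by
  induction xs generalizing acc with
  | nil => intro h; exact Or.inl h
  | cons x xs ih =>
    intro h
    simp only [fmnDD, List.foldl_cons] at h
    rcases ih _ h with h' | h'
    · by_cases hx : x ∈ acc
      · simp [hx] at h'; tauto
      · simp [hx] at h'
        rcases h' with h' | h' <;> simp [h']
    · simp [h']

theorem fmnDD_shift (a b xs : List String) (h : ∀ e ∈ xs, e ∉ a) :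
    fmnDD (a ++ b) xs = a ++ fmnDD b xs := by
  induction xs generalizing b with
  | nil => rfl
  | cons x xs ih =>
    have hx : x ∉ a := h x (by simp)
    have h' : ∀ e ∈ xs, e ∉ a := fun e he => h e (by simp [he])
    simp only [fmnDD, List.foldl_cons]
    by_cases hb : x ∈ b
    · simp only [List.mem_append, hx, hb, or_true, if_pos]
      exact ih b h'
    · simp only [List.mem_append, hx, hb, or_self, if_neg, not_false_iff]
      rw [List.append_assoc]
      exact ih (b ++ [x]) h'

theorem fmnDD_split (a xs : List String) (h : ∀ e ∈ xs, e ∉ a) :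
    fmnDD a xs = a ++ fmnDD [] xs := by
  have := fmnDD_shift a [] xs h
  simpa using this

-- the index loop of A is a map of the 4-char slice
theorem fmnMacLoop (r : List Int) (xs acc : List String) (j : Nat)
    (hjr : j + r.length ≤ xs.length) :
    (r.foldl
      (fun (st : List String × Int) _ =>
        (st.1 ++ [PySem.Str.slice (PySem.List.pyGetD xs st.2 "") none (some 4)], st.2 + 1))
      (acc, (j : Int))).1
    = acc ++ ((xs.drop j).take r.length).map (fun s => PySem.Str.slice s none (some 4)) := by
  induction r generalizing acc j with
  | nil => simp
  | cons i r ih =>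
    have hj : j < xs.length := by simp at hjr; omega
    simp only [List.foldl_cons]
    rw [PySem.List.pyGetD_eq_getElem xs "" (by positivity) (by exact_mod_cast hj)]
    rw [show ((j : Int) + 1) = (((j + 1 : Nat)) : Int) by push_cast; ring]
    rw [ih _ (j + 1) (by simp at hjr ⊢; omega)]
    rw [List.drop_eq_getElem_cons hj]
    simp only [List.length_cons, List.take_succ_cons, List.map_cons, Int.toNat_natCast,
      List.append_assoc, List.singleton_append]

-- first-character characterisations on the string level
theorem fmn_head_of_startswith (s : String) (c : Char)
    (h : PySem.Str.startswith s (String.ofList [c]) = true) : s.toList.head? = some c := by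
  rw [PySem.Str.startswith_eq, PySem.Chars.startswith_iff, String.toList_ofList] at h
  rcases h with ⟨t, ht⟩
  cases hs : s.toList with
  | nil => rw [hs] at ht; simp at ht
  | cons x l => rw [hs] at ht; simp at ht; simp [ht.1]

theorem fmn_slice1_eq_iff (s : String) (c : Char) :
    (PySem.Str.slice s none (some 1) = String.ofList [c]) ↔ s.toList.head? = some c := by
  rw [← String.toList_inj]
  have : (PySem.Str.slice s none (some 1)).toList = s.toList.take 1 := by
    simp [PySem.Str.slice, PySem.Chars.slice_eq_listSlice]
    rw [PySem.List.slice_to s.toList (by norm_num : (0:Int) ≤ 1)]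
    rfl
  rw [this, String.toList_ofList]
  cases hs : s.toList with
  | nil => simp
  | cons x l => simp [List.take]

theorem fmn_startswith_iff_slice1 (s : String) (c : Char) :
    PySem.Str.startswith s (String.ofList [c]) = true ↔
      PySem.Str.slice s none (some 1) = String.ofList [c] := by
  rw [fmn_slice1_eq_iff]
  rw [PySem.Str.startswith_eq, PySem.Chars.startswith_iff, String.toList_ofList]
  cases hs : s.toList with
  | nil => simp
  | cons x l => simp [List.cons_prefix_cons, eq_comm]

-- the 4-char code keeps the first character
theorem fmn_code_head (s : String) :
    (PySem.Str.slice s none (some 4)).toList.head? = s.toList.head? := by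
  have : (PySem.Str.slice s none (some 4)).toList = s.toList.take 4 := by
    simp [PySem.Str.slice, PySem.Chars.slice_eq_listSlice]
    rw [PySem.List.slice_to s.toList (by norm_num : (0:Int) ≤ 4)]
    rfl
  rw [this]
  cases s.toList <;> simp [List.take]

theorem fmn_mem_bucket_head (c : Char) (xs : List String) (e : String)
    (h : e ∈ (xs.filter (fun s => PySem.Str.startswith s (String.ofList [c]))).map
          (fun s => PySem.Str.slice s none (some 4))) :
    e.toList.head? = some c := by
  rcases List.mem_map.mp h with ⟨s, hs, rfl⟩
  rcases List.mem_filter.mp hs with ⟨_, hsw⟩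
  rw [fmn_code_head]
  exact fmn_head_of_startswith s c hsw

-- B's single pass computes the three per-bucket dedups
theorem fmnAltLoop (xs : List String) (a b c : List String) :
    xs.foldl fmnAltStep (a, b, c)
    = (fmnDD a ((xs.filter (fun s => PySem.Str.startswith s "7")).map
          (fun s => PySem.Str.slice s none (some 4))),
       fmnDD b ((xs.filter (fun s => PySem.Str.startswith s "8")).map
          (fun s => PySem.Str.slice s none (some 4))),
       fmnDD c ((xs.filter (fun s => PySem.Str.startswith s "9")).map
          (fun s => PySem.Str.slice s none (some 4)))) := by
  induction xs generalizing a b c with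
  | nil => rfl
  | cons x xs ih =>
    have e7 : ("7" : String) = String.ofList ['7'] := rfl
    have e8 : ("8" : String) = String.ofList ['8'] := rfl
    have e9 : ("9" : String) = String.ofList ['9'] := rfl
    simp only [List.foldl_cons, List.filter_cons]
    by_cases h7 : PySem.Str.startswith x "7" = true
    · have hs7 : PySem.Str.slice x none (some 1) = "7" := by
        rw [e7] at h7 ⊢; exact (fmn_startswith_iff_slice1 x '7').mp h7
      have h8 : ¬ PySem.Str.startswith x "8" = true := by
        intro h; have := fmn_head_of_startswith x '8' (by rw [← e8]; exact h)
        have := fmn_head_of_startswith x '7' (by rw [← e7]; exact h7)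
        simp_all
      have h9 : ¬ PySem.Str.startswith x "9" = true := by
        intro h; have := fmn_head_of_startswith x '9' (by rw [← e9]; exact h)
        have := fmn_head_of_startswith x '7' (by rw [← e7]; exact h7)
        simp_all
      simp only [h7, h8, h9, if_true, if_false, Bool.false_eq_true]
      rw [fmnAltStep]
      simp only [hs7]
      by_cases hc : PySem.Str.slice x none (some 4) ∈ a
      · simp only [if_pos hc]
        rw [ih]
        simp [fmnDD, hc]
      · simp only [if_neg hc]
        rw [ih]
        simp [fmnDD, hc]
    · by_cases h8 : PySem.Str.startswith x "8" = true
      · have hs8 : PySem.Str.slice x none (some 1) = "8" := by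
          rw [e8] at h8 ⊢; exact (fmn_startswith_iff_slice1 x '8').mp h8
        have hs7 : ¬ PySem.Str.slice x none (some 1) = "7" := by
          rw [e7]; intro h
          exact h7 (by rw [e7]; exact (fmn_startswith_iff_slice1 x '7').mpr h)
        have h9 : ¬ PySem.Str.startswith x "9" = true := by
          intro h; have := fmn_head_of_startswith x '9' (by rw [← e9]; exact h)
          have := fmn_head_of_startswith x '8' (by rw [← e8]; exact h8)
          simp_all
        simp only [h7, h8, h9, if_true, if_false, Bool.false_eq_true]
        rw [fmnAltStep]
        simp only [hs8]
        by_cases hc : PySem.Str.slice x none (some 4) ∈ b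
        · simp only [if_pos hc]; rw [ih]; simp [fmnDD, hc]
        · simp only [if_neg hc]; rw [ih]; simp [fmnDD, hc]
      · by_cases h9 : PySem.Str.startswith x "9" = true
        · have hs9 : PySem.Str.slice x none (some 1) = "9" := by
            rw [e9] at h9 ⊢; exact (fmn_startswith_iff_slice1 x '9').mp h9
          have hs7 : ¬ PySem.Str.slice x none (some 1) = "7" := by
            rw [e7]; intro h
            exact h7 (by rw [e7]; exact (fmn_startswith_iff_slice1 x '7').mpr h)
          have hs8 : ¬ PySem.Str.slice x none (some 1) = "8" := by
            rw [e8]; intro h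
            exact h8 (by rw [e8]; exact (fmn_startswith_iff_slice1 x '8').mpr h)
          simp only [h7, h8, h9, if_true, if_false, Bool.false_eq_true]
          rw [fmnAltStep]
          simp only [hs9]
          by_cases hc : PySem.Str.slice x none (some 4) ∈ c
          · simp only [if_pos hc]; rw [ih]; simp [fmnDD, hc]
          · simp only [if_neg hc]; rw [ih]; simp [fmnDD, hc]
        · have hs7 : ¬ PySem.Str.slice x none (some 1) = "7" := by
            rw [e7]; intro h
            exact h7 (by rw [e7]; exact (fmn_startswith_iff_slice1 x '7').mpr h)
          have hs8 : ¬ PySem.Str.slice x none (some 1) = "8" := by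
            rw [e8]; intro h
            exact h8 (by rw [e8]; exact (fmn_startswith_iff_slice1 x '8').mpr h)
          have hs9 : ¬ PySem.Str.slice x none (some 1) = "9" := by
            rw [e9]; intro h
            exact h9 (by rw [e9]; exact (fmn_startswith_iff_slice1 x '9').mpr h)
          simp only [h7, h8, h9, if_false, Bool.false_eq_true]
          rw [fmnAltStep]
          simp only [hs7, hs8, hs9]
          exact ih a b c

-- ===== VERDICT (by name: the statement is the Claim_ definition above) =====
theorem filterMobileNumbers_spec : Claim_equal_filterMobileNumbers := by
  intro callList _
  unfold Spec_filterMobileNumbers filterMobileNumbers filterMobileNumbers_alt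
  set u := (callList.filter (fun s => PySem.Str.startswith s "7")).map
      (fun s => PySem.Str.slice s none (some 4)) with hu
  set v := (callList.filter (fun s => PySem.Str.startswith s "8")).map
      (fun s => PySem.Str.slice s none (some 4)) with hv
  set w := (callList.filter (fun s => PySem.Str.startswith s "9")).map
      (fun s => PySem.Str.slice s none (some 4)) with hw
  rw [fmnAltLoop]
  -- reduce A's index loop to the map of slices
  have e7 : ("7" : String) = String.ofList ['7'] := rfl
  have e8 : ("8" : String) = String.ofList ['8'] := rfl
  have e9 : ("9" : String) = String.ofList ['9'] := rfl
  set comb := callList.filter (fun i => PySem.Str.startswith i "7")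
      ++ callList.filter (fun j => PySem.Str.startswith j "8")
      ++ callList.filter (fun x => PySem.Str.startswith x "9") with hcomb
  have hmac :
      ((PySem.List.pyRange 0 (comb.length : Int) 1).foldl
        (fun (st : List String × Int) _ =>
          (st.1 ++ [PySem.Str.slice (PySem.List.pyGetD comb st.2 "") none (some 4)], st.2 + 1))
        ([], 0)).1
      = comb.map (fun s => PySem.Str.slice s none (some 4)) := by
    rw [show (0 : Int) = ((0 : Nat) : Int) from rfl]
    rw [fmnMacLoop _ comb [] 0 (by simp [PySem.List.length_pyRange_one])]
    simp [PySem.List.length_pyRange_one]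
  dsimp only
  rw [hmac]
  have hmap : comb.map (fun s => PySem.Str.slice s none (some 4)) = u ++ v ++ w := by
    rw [hcomb]; simp [hu, hv, hw]
  rw [hmap]
  -- dedup of the concatenation splits at the bucket boundaries
  show fmnDD [] (u ++ v ++ w) = _
  have hdisj7 : ∀ e ∈ v, e ∉ fmnDD [] u := by
    intro e he hmem
    rcases mem_fmnDD [] u e hmem with h | h
    · simp at h
    · have h7 := fmn_mem_bucket_head '7' callList e (by rw [← e7]; exact hu ▸ h)
      have h8 := fmn_mem_bucket_head '8' callList e (by rw [← e8]; exact hv ▸ he)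
      simp_all
  have hdisj9 : ∀ e ∈ w, e ∉ fmnDD [] u ++ fmnDD [] v := by
    intro e he hmem
    have h9 := fmn_mem_bucket_head '9' callList e (by rw [← e9]; exact hw ▸ he)
    rcases List.mem_append.mp hmem with h | h
    · rcases mem_fmnDD [] u e h with h' | h'
      · simp at h'
      · have h7 := fmn_mem_bucket_head '7' callList e (by rw [← e7]; exact hu ▸ h')
        simp_all
    · rcases mem_fmnDD [] v e h with h' | h'
      · simp at h'
      · have h8 := fmn_mem_bucket_head '8' callList e (by rw [← e8]; exact hv ▸ h')
        simp_all
  calc fmnDD [] (u ++ v ++ w)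
      = fmnDD (fmnDD (fmnDD [] u) v) w := by
        simp only [fmnDD, List.append_assoc, List.foldl_append]
    _ = fmnDD (fmnDD [] u ++ fmnDD [] v) w := by
        rw [fmnDD_split _ _ hdisj7]
    _ = fmnDD [] u ++ fmnDD [] v ++ fmnDD [] w := by
        rw [fmnDD_split _ _ hdisj9]
    _ = _ := by
        simp only [hu, hv, hw, PySem.Str.startswith_eq, List.append_assoc,
          show ("7" : String).toList = ['7'] from rfl,
          show ("8" : String).toList = ['8'] from rfl,
          show ("9" : String).toList = ['9'] from rfl]
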